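-- pv_equiv track=rewrite | github.com/sunmingtao/sample-code | python/projecteuler/p51.py | min_duplicate_digits
-- ===== SOURCE A (Python) =====
-- def min_duplicate_digits(num):
--     count_dict = {}
--     num_str = str(num)
--     for i in range(len(num_str)):
--         if num_str[i] in count_dict:
--             count_dict[num_str[i]] += 1
--         else:
--             count_dict[num_str[i]] = 1
--     duplicate_digits = [i for i in count_dict.keys() if count_dict[i] > 1]
--     if len(duplicate_digits) == 0:
--         return -1
--     else:
--         return int(min(duplicate_digits))
-- ===== SOURCE B (Python) =====
-- def min_duplicate_digits(num):
--     s = str(num)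
--     for d in "0123456789":
--         if s.count(d) > 1:
--             return int(d)
--     return -1
-- ===== Notes on version B (the rewrite author's own statement) =====
-- stated objective: alternative
-- what changed: Instead of tabulating character frequencies in a dict and taking the min of the duplicated keys, B scans the ten candidate digit characters in ascending order and returns the first one that occurs more than once in str(num) (only digits can repeat there, and ascending order yields the minimum directly).
import Mathlib
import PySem

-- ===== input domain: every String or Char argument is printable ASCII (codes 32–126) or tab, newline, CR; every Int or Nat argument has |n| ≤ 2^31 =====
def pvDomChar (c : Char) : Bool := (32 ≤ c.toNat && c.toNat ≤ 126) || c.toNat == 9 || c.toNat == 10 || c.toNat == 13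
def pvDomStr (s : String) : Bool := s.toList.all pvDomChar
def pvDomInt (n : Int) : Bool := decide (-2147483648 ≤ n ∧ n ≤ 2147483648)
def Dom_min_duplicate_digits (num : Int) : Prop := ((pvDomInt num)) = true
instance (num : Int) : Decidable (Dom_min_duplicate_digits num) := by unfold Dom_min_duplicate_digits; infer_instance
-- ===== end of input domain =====

-- B replaces A's frequency-dict tabulation by an ascending probe of the ten candidate
-- digit characters, returning the first one repeated in str(num); objective: alternative.

-- ===== PORT A =====
-- one loop step: 'if num_str[i] in count_dict: count_dict[c] += 1 else: count_dict[c] = 1'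
def pvAStep (d : PySem.Dict Char Int) (c : Char) : PySem.Dict Char Int :=
  if d.contains c then d.modify c 0 (· + 1) else d.insert c 1

def min_duplicate_digits (num : Int) : Int :=
  let numStr := PySem.Int.toChars num
  let countDict := (PySem.List.pyRange 0 (PySem.List.len numStr) 1).foldl
    (fun d i => pvAStep d (PySem.List.pyGetD numStr i ' ')) PySem.Dict.empty
  let duplicateDigits := (PySem.Dict.keys countDict).filter
    (fun c => decide (1 < countDict.getD c 0))
  if duplicateDigits.length = 0 then -1
  else
    match PySem.List.min? duplicateDigits (fun c => c) with
    | some m => (PySem.Int.ofChars? [m]).getD 0  -- int(min(...)); the min is a digit char, so ofChars? is some and the default is unreachable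
    | none => -1  -- unreachable: the list is nonempty

-- ===== PORT B =====
-- 'for d in "0123456789": if s.count(d) > 1: return int(d)' then 'return -1'
def pvBGo (s : List Char) : List Char → Int
  | [] => -1
  | d :: rest => if 1 < PySem.Chars.count s [d] then (PySem.Int.ofChars? [d]).getD 0 else pvBGo s rest

def min_duplicate_digits_alt (num : Int) : Int :=
  pvBGo (PySem.Int.toChars num) "0123456789".toList

-- ===== PRECONDITION & SPEC =====
def Spec_min_duplicate_digits (num : Int) (out : Int) : Prop := out = min_duplicate_digits_alt num
instance (num : Int) (out : Int) : Decidable (Spec_min_duplicate_digits num out) := by unfold Spec_min_duplicate_digits; infer_instance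

-- ===== CLAIM (what is proved, stated in full; the proofs are below) =====
def Claim_equal_min_duplicate_digits : Prop := ∀ (num : Int), Dom_min_duplicate_digits num → Spec_min_duplicate_digits num (min_duplicate_digits num)

-- ===== LEMMAS AND PROOFS =====

-- A's branch 'contains → modify / else insert 1' is exactly Counter's modify step
theorem pvAStep_eq_modify (d : PySem.Dict Char Int) (c : Char) :
    pvAStep d c = d.modify c 0 (· + 1) := by
  unfold pvAStep
  by_cases h : d.contains c
  · simp [h]
  · have hb : d.contains c = false := by simpa using h
    have hc := PySem.Dict.contains_eq_isSome_get? (d := d) (k := c)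
    rw [hb] at hc
    have hg : d.get? c = none := Option.not_isSome_iff_eq_none.mp (by simp [← hc])
    simp [h, PySem.Dict.modify, PySem.Dict.getD, hg]

-- s.count with a single-character needle, fuelled worker: counts occurrences
theorem pvGoSingle (d : Char) : ∀ (s : List Char) (fuel acc : Nat), s.length ≤ fuel →
    PySem.Chars.count.go [d] fuel s acc = acc + s.count d := by
  intro s
  induction s with
  | nil => intro fuel acc _; cases fuel <;> simp [PySem.Chars.count.go]
  | cons h t ih =>
    intro fuel acc hf
    cases fuel with
    | zero => simp at hf
    | succ f =>
      simp only [PySem.Chars.count.go]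
      by_cases hdh : d = h
      · subst hdh
        simp [List.isPrefixOf, ih f (acc+1) (by simpa using hf)]
        omega
      · have hp : ([d].isPrefixOf (h :: t)) = false := by
          simp [List.isPrefixOf]; exact fun hc => hdh (by simpa using hc)
        have hhd : ¬ h = d := fun he => hdh he.symm
        simp [hp, ih f acc (by simpa using hf), hhd]

-- s.count(d) for a single-character needle is List.count
theorem pvCount_singleton (s : List Char) (d : Char) :
    PySem.Chars.count s [d] = s.count d := by
  simp [PySem.Chars.count, pvGoSingle d s s.length 0 le_rfl]

-- every character produced by Nat.toDigitsCore 10 (beyond the accumulator) is a decimal digit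
theorem pvMem_core : ∀ (fuel n : Nat) (ds : List Char) (c : Char),
    c ∈ Nat.toDigitsCore 10 fuel n ds → c ∈ ds ∨ c ∈ "0123456789".toList := by
  intro fuel
  induction fuel with
  | zero => intro n ds c h; rw [Nat.toDigitsCore] at h; exact Or.inl h
  | succ f ih =>
    intro n ds c h
    rw [Nat.toDigitsCore] at h
    have hdig : (n % 10).digitChar ∈ "0123456789".toList := by
      have h10 : n % 10 < 10 := Nat.mod_lt _ (by norm_num)
      revert h10; generalize n % 10 = k; intro h10
      interval_cases k <;> decide
    by_cases hz : n / 10 = 0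
    · simp only [hz] at h
      rcases List.mem_cons.mp (by simpa using h) with rfl | h'
      · exact Or.inr hdig
      · exact Or.inl h'
    · simp only [if_neg hz] at h
      rcases ih (n / 10) (_ :: ds) c h with h' | h'
      · rcases List.mem_cons.mp h' with rfl | h''
        · exact Or.inr hdig
        · exact Or.inl h''
      · exact Or.inr h'

-- every character produced by Nat.toDigits 10 is a decimal digit character
theorem pvMem_toDigits {c : Char} {n : Nat} (h : c ∈ Nat.toDigits 10 n) :
    c ∈ "0123456789".toList := by
  rcases pvMem_core (n+1) n [] c h with h' | h'
  · simp at h'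
  · exact h'

-- every character repeated in str(num) is a decimal digit character
theorem pvDup_digit (num : Int) {c : Char} (h : 1 < (PySem.Int.toChars num).count c) :
    c ∈ "0123456789".toList := by
  unfold PySem.Int.toChars at h
  by_cases hneg : num < 0
  · rw [if_pos hneg] at h
    by_cases hc : c = '-'
    · subst hc
      have hnm : '-' ∉ Nat.toDigits 10 num.natAbs := fun hm => by
        have := pvMem_toDigits hm; simp at this
      rw [List.count_cons_self, List.count_eq_zero.mpr hnm] at h
      omega
    · rw [List.count_cons_of_ne (fun he => hc he.symm)] at h
      have hpos : 0 < List.count c (Nat.toDigits 10 num.natAbs) := by omega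
      exact pvMem_toDigits (List.count_pos_iff.mp hpos)
  · rw [if_neg hneg] at h
    have hpos : 0 < List.count c (Nat.toDigits 10 num.toNat) := by omega
    exact pvMem_toDigits (List.count_pos_iff.mp hpos)

-- B's loop returns -1 when no probed digit repeats
theorem pvBGo_none (s : List Char) (ds : List Char)
    (h : ∀ d ∈ ds, ¬ 1 < s.count d) : pvBGo s ds = -1 := by
  induction ds with
  | nil => rfl
  | cons d rest ih =>
    rw [pvBGo, pvCount_singleton, if_neg (h d (List.mem_cons_self))]
    exact ih fun x hx => h x (List.mem_cons_of_mem _ hx)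

-- B's loop returns int(m) when m is the least repeated character and occurs in the
-- strictly increasing probe list
theorem pvBGo_min (s : List Char) (m : Char) : ∀ (ds : List Char),
    ds.Pairwise (· < ·) → m ∈ ds → 1 < s.count m →
    (∀ d, 1 < s.count d → m ≤ d) →
    pvBGo s ds = (PySem.Int.ofChars? [m]).getD 0 := by
  intro ds
  induction ds with
  | nil => intro _ hmem; simp at hmem
  | cons d rest ih =>
    intro hsorted hmem hm hmin
    rw [pvBGo, pvCount_singleton]
    by_cases hd : 1 < s.count d
    · rw [if_pos hd]
      have hmd : m ≤ d := hmin d hd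
      have hdm : m = d := by
        rcases List.mem_cons.mp hmem with rfl | hmr
        · rfl
        · exact absurd hmd (not_le.mpr ((List.pairwise_cons.mp hsorted).1 m hmr))
      rw [hdm]
    · rw [if_neg hd]
      have hmr : m ∈ rest := by
        rcases List.mem_cons.mp hmem with rfl | hmr
        · exact absurd hm hd
        · exact hmr
      exact ih (List.pairwise_cons.mp hsorted).2 hmr hm hmin

-- ===== VERDICT (by name: the statement is the Claim_ definition above) =====
theorem min_duplicate_digits_spec : Claim_equal_min_duplicate_digits := by
  intro num _
  unfold Spec_min_duplicate_digits min_duplicate_digits min_duplicate_digits_alt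
  dsimp only
  rw [PySem.List.foldl_pyRange_zero_pyGetD (PySem.Int.toChars num) ' ' pvAStep PySem.Dict.empty]
  have hstep : pvAStep = fun (d : PySem.Dict Char Int) c => d.modify c 0 (· + 1) :=
    funext fun d => funext fun c => pvAStep_eq_modify d c
  rw [hstep, ← PySem.Dict.counter_eq_foldl]
  simp only [PySem.Dict.keys_counter, PySem.Dict.getD_counter]
  set s := PySem.Int.toChars num with hs
  set dup := (PySem.Set.ofList s).filter (fun c => decide (1 < ((List.count c s : Int)))) with hdupdef
  have hdupmem : ∀ c, c ∈ dup ↔ 1 < s.count c := by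
    intro c
    constructor
    · intro hc
      have h2 := (List.mem_filter.mp hc).2
      simpa using h2
    · intro hc
      refine List.mem_filter.mpr ⟨?_, by simpa using hc⟩
      exact (PySem.Set.mem_ofList _ _).mpr (List.count_pos_iff.mp (by omega))
  by_cases hdup : dup = []
  · rw [if_pos (by rw [hdup]; rfl)]
    refine (pvBGo_none s _ fun d _ => fun hlt => ?_).symm
    have := (hdupmem d).mpr hlt
    rw [hdup] at this
    simp at this
  · have hlen : ¬ dup.length = 0 := fun h0 => hdup (List.eq_nil_of_length_eq_zero h0)
    rw [if_neg hlen]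
    obtain ⟨m, hm⟩ : ∃ m, PySem.List.min? dup (fun c => c) = some m := by
      cases hmin : PySem.List.min? dup (fun c => c) with
      | none => exact absurd ((PySem.List.min?_eq_none_iff _ _).mp hmin) hdup
      | some m => exact ⟨m, rfl⟩
    rw [hm]
    have hmdup : m ∈ dup := PySem.List.min?_mem hm
    have hmc : 1 < s.count m := (hdupmem m).mp hmdup
    have hdigit : m ∈ "0123456789".toList := pvDup_digit num hmc
    have hmin' : ∀ d, 1 < s.count d → m ≤ d := fun d hd => PySem.List.min?_isMin hm d ((hdupmem d).mpr hd)
    exact (pvBGo_min s m _ (by decide) hdigit hmc hmin').symm
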